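-- pv_equiv track=rewrite | github.com/mattebur/influencer-website | influencer/my_functions.py | emailAddressList
-- ===== SOURCE A (Python) =====
-- def emailAddressList(receiver):
--     text = receiver
--     clean_text = ''
--     for letter in text:
--         if letter == ' ':
--             continue
--         else:
--             clean_text += letter
--     list_of_emails = clean_text.split(';')
--     return list_of_emails
-- ===== SOURCE B (Python) =====
-- def emailAddressList(receiver):
--     parts = receiver.split(';')
--     return [p.replace(' ', '') for p in parts]
-- ===== Notes on version B (the rewrite author's own statement) =====
-- stated objective: simpler
-- what changed: B splits the string on the separator first and then strips spaces from each segment with str.replace, instead of A's character-by-character Python loop that concatenates a space-free string before splitting.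
import Mathlib
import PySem

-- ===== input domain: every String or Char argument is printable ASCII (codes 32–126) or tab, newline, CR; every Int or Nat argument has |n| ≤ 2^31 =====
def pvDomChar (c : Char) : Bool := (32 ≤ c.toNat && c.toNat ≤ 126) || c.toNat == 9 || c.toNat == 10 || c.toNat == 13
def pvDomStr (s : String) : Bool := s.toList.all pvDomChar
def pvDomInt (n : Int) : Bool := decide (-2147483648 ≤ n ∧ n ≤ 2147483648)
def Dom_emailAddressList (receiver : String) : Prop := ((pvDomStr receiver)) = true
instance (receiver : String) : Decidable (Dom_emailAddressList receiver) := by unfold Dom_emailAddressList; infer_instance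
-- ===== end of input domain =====

-- B splits on ';' first and then removes spaces from each segment with replace,
-- instead of A's char loop that builds a space-free string before the split (objective: simpler).

-- ===== PORT A =====
def emailAddressList (receiver : String) : List String :=
  let text := receiver
  let cleanText := text.toList.foldl (fun s c => if c == ' ' then s else s.push c) ""
  -- clean_text.split(';'): nonempty separator, so Python never raises; Chars.splitOn is the sep ≠ "" form
  (PySem.Chars.splitOn cleanText.toList ";".toList).map String.ofList

-- ===== PORT B =====
def emailAddressList_alt (receiver : String) : List String :=
  let parts := (PySem.Chars.splitOn receiver.toList ";".toList).map String.ofList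
  parts.map (fun p => PySem.Str.replace p " " "")

-- ===== PRECONDITION & SPEC =====
def Spec_emailAddressList (receiver : String) (out : List String) : Prop := out = emailAddressList_alt receiver
instance (receiver : String) (out : List String) : Decidable (Spec_emailAddressList receiver out) := by unfold Spec_emailAddressList; infer_instance

-- ===== CLAIM (what is proved, stated in full; the proofs are below) =====
def Claim_equal_emailAddressList : Prop := ∀ (receiver : String), Dom_emailAddressList receiver → Spec_emailAddressList receiver (emailAddressList receiver)

-- ===== LEMMAS AND PROOFS =====

-- simple structural description of splitting a char list on ';' with a current-segment accumulator
def pvSplitSemi : List Char → List Char → List (List Char)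
  | [], cur => [cur.reverse]
  | c :: rest, cur => if c = ';' then cur.reverse :: pvSplitSemi rest [] else pvSplitSemi rest (c :: cur)

-- unfolding equations for the fuel loops (all definitional)
theorem pvSGo_zero (l cur : List Char) (acc : List (List Char)) :
    PySem.Chars.splitOn.go [';'] 0 l cur acc = ((cur.reverse ++ l) :: acc).reverse := rfl
theorem pvSGo_nil (cur : List Char) (acc : List (List Char)) (n : Nat) :
    PySem.Chars.splitOn.go [';'] (n+1) [] cur acc = (cur.reverse :: acc).reverse := rfl
theorem pvSGo_cons (c : Char) (rest cur : List Char) (acc : List (List Char)) (n : Nat) :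
    PySem.Chars.splitOn.go [';'] (n+1) (c::rest) cur acc =
      if [';'].isPrefixOf (c::rest) then PySem.Chars.splitOn.go [';'] n rest [] (cur.reverse :: acc)
      else PySem.Chars.splitOn.go [';'] n rest (c :: cur) acc := rfl
theorem pvRGo_zero (l acc : List Char) :
    PySem.Chars.replace.go [' '] [] 0 l acc = acc.reverse ++ l := rfl
theorem pvRGo_nil (acc : List Char) (n : Nat) :
    PySem.Chars.replace.go [' '] [] (n+1) [] acc = acc.reverse := rfl
theorem pvRGo_cons (c : Char) (t acc : List Char) (n : Nat) :
    PySem.Chars.replace.go [' '] [] (n+1) (c::t) acc =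
      if [' '].isPrefixOf (c::t) then PySem.Chars.replace.go [' '] [] n t acc
      else PySem.Chars.replace.go [' '] [] n t (c :: acc) := rfl

theorem pvPrefixOf_single (a c : Char) (rest : List Char) :
    [a].isPrefixOf (c :: rest) = (a == c) := by
  simp [List.isPrefixOf]

theorem pvSplitOn_go_eq (fuel : Nat) (l cur : List Char) (acc : List (List Char)) (h : l.length ≤ fuel) :
    PySem.Chars.splitOn.go [';'] fuel l cur acc = acc.reverse ++ pvSplitSemi l cur := by
  induction fuel generalizing l cur acc with
  | zero =>
    have : l = [] := List.eq_nil_of_length_eq_zero (Nat.le_zero.mp h)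
    subst this
    simp [pvSGo_zero, pvSplitSemi]
  | succ n ih =>
    cases l with
    | nil => simp [pvSGo_nil, pvSplitSemi]
    | cons c rest =>
      rw [pvSGo_cons, pvPrefixOf_single]
      by_cases hc : c = ';'
      · subst hc
        rw [if_pos (by simp), ih rest [] _ (Nat.le_of_succ_le_succ h)]
        simp [pvSplitSemi]
      · rw [if_neg (by simp [Ne.symm hc]), ih rest (c :: cur) acc (Nat.le_of_succ_le_succ h)]
        simp [pvSplitSemi, hc]

theorem pvSplitOn_eq (l : List Char) :
    PySem.Chars.splitOn l [';'] = pvSplitSemi l [] := by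
  unfold PySem.Chars.splitOn
  rw [pvSplitOn_go_eq _ _ _ _ (Nat.le_succ_of_le (Nat.le_refl _))]
  simp

-- replace ' ' by '' is filtering out spaces
theorem pvReplace_go_eq (fuel : Nat) (l acc : List Char) (h : l.length ≤ fuel) :
    PySem.Chars.replace.go [' '] [] fuel l acc = acc.reverse ++ l.filter (fun c => !(c == ' ')) := by
  induction fuel generalizing l acc with
  | zero =>
    have : l = [] := List.eq_nil_of_length_eq_zero (Nat.le_zero.mp h)
    subst this
    simp [pvRGo_zero]
  | succ n ih =>
    cases l with
    | nil => simp [pvRGo_nil]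
    | cons c rest =>
      rw [pvRGo_cons, pvPrefixOf_single]
      by_cases hc : c = ' '
      · subst hc
        rw [if_pos (by simp), ih rest acc (Nat.le_of_succ_le_succ h)]
        simp
      · rw [if_neg (by simp [Ne.symm hc]), ih rest (c :: acc) (Nat.le_of_succ_le_succ h)]
        simp [hc]

theorem pvReplace_eq (l : List Char) :
    PySem.Chars.replace l [' '] [] = l.filter (fun c => !(c == ' ')) := by
  unfold PySem.Chars.replace
  rw [if_neg (by simp)]
  rw [pvReplace_go_eq _ _ _ (Nat.le_refl _)]
  simp

-- A's accumulator loop builds exactly the space-filtered string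
theorem pvFoldl_push_eq (l : List Char) (s : String) :
    (l.foldl (fun s c => if c == ' ' then s else s.push c) s).toList
      = s.toList ++ l.filter (fun c => !(c == ' ')) := by
  induction l generalizing s with
  | nil => simp
  | cons c rest ih =>
    by_cases hc : c = ' '
    · subst hc
      rw [List.foldl_cons, if_pos (beq_self_eq_true ' '), ih]
      simp
    · rw [List.foldl_cons, if_neg (show ¬((c == ' ') = true) from by simpa using hc), ih]
      simp [hc]

-- filtering out spaces commutes with splitting on ';'
theorem pvFilter_split (l cur : List Char) :
    pvSplitSemi (l.filter (fun c => !(c == ' '))) (cur.filter (fun c => !(c == ' ')))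
      = (pvSplitSemi l cur).map (fun q => q.filter (fun c => !(c == ' '))) := by
  induction l generalizing cur with
  | nil => simp [pvSplitSemi, List.filter_reverse]
  | cons c rest ih =>
    by_cases hc : c = ' '
    · subst hc
      have h1 : pvSplitSemi (' ' :: rest) cur = pvSplitSemi rest (' ' :: cur) := by
        simp [pvSplitSemi]
      have h2 : List.filter (fun c => !(c == ' ')) (' ' :: cur)
          = List.filter (fun c => !(c == ' ')) cur := by simp
      rw [h1, ← ih (' ' :: cur), h2]
      simp
    · have hp : (!(c == ' ')) = true := by simp [hc]
      have hf : List.filter (fun c => !(c == ' ')) (c :: rest)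
          = c :: List.filter (fun c => !(c == ' ')) rest := by simp [hp]
      rw [hf]
      by_cases hsemi : c = ';'
      · subst hsemi
        have h0 := ih []
        simp only [List.filter_nil] at h0
        simp [pvSplitSemi, List.filter_reverse, h0]
      · have h3 : pvSplitSemi (c :: List.filter (fun c => !(c == ' ')) rest)
            (List.filter (fun c => !(c == ' ')) cur)
            = pvSplitSemi (List.filter (fun c => !(c == ' ')) rest)
              (List.filter (fun c => !(c == ' ')) (c :: cur)) := by
          simp [pvSplitSemi, hsemi, hp]
        rw [h3, ih (c :: cur)]
        simp [pvSplitSemi, hsemi]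

-- ===== VERDICT (by name: the statement is the Claim_ definition above) =====
theorem emailAddressList_spec : Claim_equal_emailAddressList := by
  intro receiver _
  unfold Spec_emailAddressList emailAddressList emailAddressList_alt
  simp only [List.map_map, show (";".toList) = [';'] from rfl]
  have hclean :
      (receiver.toList.foldl (fun s c => if c == ' ' then s else s.push c) "").toList
        = receiver.toList.filter (fun c => !(c == ' ')) := by
    simpa using pvFoldl_push_eq receiver.toList ""
  rw [hclean, pvSplitOn_eq, pvSplitOn_eq]
  have := pvFilter_split receiver.toList []
  simp only [List.filter_nil] at this
  rw [this]
  rw [List.map_map]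
  refine List.map_congr_left (fun q _ => ?_)
  simp [PySem.Str.replace, pvReplace_eq, String.toList_ofList,
    show (" ".toList) = [' '] from rfl, show ("".toList) = ([] : List Char) from rfl]
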